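-- pv_equiv track=rewrite | github.com/maxmanmull/RP_MM_2025 | Upset_reactions.py | categorize_complex
-- ===== SOURCE A (Python) =====
-- def categorize_complex(subunit_qualities):
--     """Categorize complex completeness based on subunit qualities"""
--     if not subunit_qualities:
--         return 'incomplete'
--     high_count = sum(1 for q in subunit_qualities if q == 'high')
--     moderate_count = sum(1 for q in subunit_qualities if q == 'moderate')
--     none_count = sum(1 for q in subunit_qualities if q == 'none')
--     total = len(subunit_qualities)
--
--     if high_count == total:
--         return 'complete'
--     elif high_count > 0 and moderate_count > 0 and none_count == 0:
--         return 'functional'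
--     elif moderate_count == total:
--         return 'putative'
--     else:
--         return 'incomplete'
-- ===== SOURCE B (Python) =====
-- def categorize_complex(subunit_qualities):
--     """Categorize complex completeness based on subunit qualities.
--     One pass maintaining presence flags instead of three counting passes."""
--     seen_high = seen_moderate = seen_none = seen_other = False
--     for q in subunit_qualities:
--         if q == 'high':
--             seen_high = True
--         elif q == 'moderate':
--             seen_moderate = True
--         elif q == 'none':
--             seen_none = True
--         else:
--             seen_other = True
--     if seen_high and not (seen_moderate or seen_none or seen_other):
--         return 'complete'
--     if seen_high and seen_moderate and not seen_none:
--         return 'functional'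
--     if seen_moderate and not (seen_high or seen_none or seen_other):
--         return 'putative'
--     return 'incomplete'
-- ===== Notes on version B (the rewrite author's own statement) =====
-- stated objective: simpler
-- what changed: Replaces three separate counting scans plus length comparisons by a single pass that records which labels occur (four presence flags) and classifies by presence alone; the empty-list guard disappears because no flag is set then.
import Mathlib
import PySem

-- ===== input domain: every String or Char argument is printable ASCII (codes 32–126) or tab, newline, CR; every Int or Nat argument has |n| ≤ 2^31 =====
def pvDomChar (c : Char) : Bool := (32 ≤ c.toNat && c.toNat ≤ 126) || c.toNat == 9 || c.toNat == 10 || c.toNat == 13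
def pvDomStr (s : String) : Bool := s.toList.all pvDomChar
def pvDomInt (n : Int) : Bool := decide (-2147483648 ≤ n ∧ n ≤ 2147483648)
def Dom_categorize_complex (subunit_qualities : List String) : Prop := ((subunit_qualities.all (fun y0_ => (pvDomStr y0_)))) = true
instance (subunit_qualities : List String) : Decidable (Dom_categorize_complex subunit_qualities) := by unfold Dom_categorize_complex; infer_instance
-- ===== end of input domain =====

-- B replaces A's three counting scans by one pass over presence flags; objective: simpler.

-- ===== PORT A =====
-- sum(1 for q in l if q == s) as a fold
def pvCnt (s : String) (l : List String) : Nat :=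
  l.foldl (fun acc q => if q == s then acc + 1 else acc) 0

def categorize_complex (subunit_qualities : List String) : String :=
  if subunit_qualities.isEmpty then "incomplete" else
  let high_count := pvCnt "high" subunit_qualities
  let moderate_count := pvCnt "moderate" subunit_qualities
  let none_count := pvCnt "none" subunit_qualities
  let total := subunit_qualities.length
  if high_count = total then "complete"
  else if 0 < high_count ∧ 0 < moderate_count ∧ none_count = 0 then "functional"
  else if moderate_count = total then "putative"
  else "incomplete"

-- ===== PORT B =====
-- the single pass: (seen_high, seen_moderate, seen_none, seen_other)
def pvFlags (l : List String) : Bool × Bool × Bool × Bool :=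
  l.foldl (fun st q =>
    if q == "high" then (true, st.2.1, st.2.2.1, st.2.2.2)
    else if q == "moderate" then (st.1, true, st.2.2.1, st.2.2.2)
    else if q == "none" then (st.1, st.2.1, true, st.2.2.2)
    else (st.1, st.2.1, st.2.2.1, true)) (false, false, false, false)

def categorize_complex_alt (subunit_qualities : List String) : String :=
  let st := pvFlags subunit_qualities
  if st.1 && !(st.2.1 || st.2.2.1 || st.2.2.2) then "complete"
  else if st.1 && st.2.1 && !st.2.2.1 then "functional"
  else if st.2.1 && !(st.1 || st.2.2.1 || st.2.2.2) then "putative"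
  else "incomplete"

-- ===== PRECONDITION & SPEC =====
def Spec_categorize_complex (subunit_qualities : List String) (out : String) : Prop := out = categorize_complex_alt subunit_qualities
instance (subunit_qualities : List String) (out : String) : Decidable (Spec_categorize_complex subunit_qualities out) := by unfold Spec_categorize_complex; infer_instance

-- ===== CLAIM (what is proved, stated in full; the proofs are below) =====
def Claim_equal_categorize_complex : Prop := ∀ (subunit_qualities : List String), Dom_categorize_complex subunit_qualities → Spec_categorize_complex subunit_qualities (categorize_complex subunit_qualities)

-- ===== LEMMAS AND PROOFS =====

theorem pvCnt_aux (s : String) (l : List String) : ∀ c : Nat,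
    l.foldl (fun acc q => if q == s then acc + 1 else acc) c = c + l.countP (· == s) := by
  induction l with
  | nil => intro c; simp
  | cons a t ih =>
    intro c
    rw [List.foldl_cons, ih, List.countP_cons]
    by_cases h : (a == s) = true
    · simp [h]; omega
    · simp [h]

theorem pvCnt_eq (s : String) (l : List String) : pvCnt s l = l.countP (· == s) := by
  rw [pvCnt, pvCnt_aux s l 0, Nat.zero_add]

theorem pvFlags_aux (l : List String) : ∀ st : Bool × Bool × Bool × Bool,
    l.foldl (fun st q =>
      if q == "high" then (true, st.2.1, st.2.2.1, st.2.2.2)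
      else if q == "moderate" then (st.1, true, st.2.2.1, st.2.2.2)
      else if q == "none" then (st.1, st.2.1, true, st.2.2.2)
      else (st.1, st.2.1, st.2.2.1, true)) st
    = (st.1 || l.any (· == "high"),
       st.2.1 || l.any (· == "moderate"),
       st.2.2.1 || l.any (· == "none"),
       st.2.2.2 || l.any (fun q => !(q == "high") && !(q == "moderate") && !(q == "none"))) := by
  induction l with
  | nil => intro st; simp
  | cons a t ih =>
    intro st
    rw [List.foldl_cons]
    by_cases h1 : a = "high"
    · rw [if_pos (by simp [h1]), ih]; simp [h1]
    · rw [if_neg (by simp [h1])]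
      by_cases h2 : a = "moderate"
      · rw [if_pos (by simp [h2]), ih]; simp [h2]
      · rw [if_neg (by simp [h2])]
        by_cases h3 : a = "none"
        · rw [if_pos (by simp [h3]), ih]; simp [h3]
        · rw [if_neg (by simp [h3]), ih]
          have e1 : (a == "high") = false := by simp [h1]
          have e2 : (a == "moderate") = false := by simp [h2]
          have e3 : (a == "none") = false := by simp [h3]
          simp [e1, e2, e3]

theorem pvFlags_eq (l : List String) :
    pvFlags l = (l.any (· == "high"), l.any (· == "moderate"), l.any (· == "none"),
      l.any (fun q => !(q == "high") && !(q == "moderate") && !(q == "none"))) := by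
  simpa [pvFlags] using pvFlags_aux l (false, false, false, false)

-- characterizations of A's three branch conditions as B's flag conditions
theorem cond1 (a : String) (t : List String) :
    ((a::t).countP (· == "high") = (a::t).length) ↔
    (((a::t).any (· == "high")) && !(((a::t).any (· == "moderate")) || ((a::t).any (· == "none")) ||
      ((a::t).any (fun q => !(q == "high") && !(q == "moderate") && !(q == "none"))))) = true := by
  rw [List.countP_eq_length]
  simp
  constructor
  · rintro ⟨rfl, hall⟩
    exact ⟨Or.inl rfl, ⟨⟨by simp, fun x hx => by simp [hall x hx]⟩, by simp,
      fun x hx => by simp [hall x hx]⟩, Or.inl (Or.inl rfl),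
      fun x hx h1 _ => absurd (hall x hx) h1⟩
  · rintro ⟨-, ⟨⟨ham, hm⟩, han, hn⟩, hd, himp⟩
    constructor
    · rcases hd with (h | h) | h
      · exact h
      · exact absurd h ham
      · exact absurd h han
    · intro x hx
      by_contra hxh
      exact hn x hx (himp x hx hxh (hm x hx))

theorem cond2 (l : List String) :
    (0 < l.countP (· == "high") ∧ 0 < l.countP (· == "moderate") ∧ l.countP (· == "none") = 0) ↔
    ((l.any (· == "high")) && (l.any (· == "moderate")) && !(l.any (· == "none"))) = true := by
  rw [List.countP_pos_iff, List.countP_pos_iff, List.countP_eq_zero]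
  simp [and_assoc]

theorem cond3 (a : String) (t : List String) :
    ((a::t).countP (· == "moderate") = (a::t).length) ↔
    (((a::t).any (· == "moderate")) && !(((a::t).any (· == "high")) || ((a::t).any (· == "none")) ||
      ((a::t).any (fun q => !(q == "high") && !(q == "moderate") && !(q == "none"))))) = true := by
  rw [List.countP_eq_length]
  simp
  constructor
  · rintro ⟨rfl, hall⟩
    exact ⟨Or.inl rfl, ⟨⟨by simp, fun x hx => by simp [hall x hx]⟩, by simp,
      fun x hx => by simp [hall x hx]⟩, Or.inl (Or.inr rfl),
      fun x hx _ h2 => absurd (hall x hx) h2⟩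
  · rintro ⟨-, ⟨⟨hah, hh⟩, han, hn⟩, hd, himp⟩
    constructor
    · rcases hd with (h | h) | h
      · exact absurd h hah
      · exact h
      · exact absurd h han
    · intro x hx
      by_contra hxm
      exact hn x hx (himp x hx (hh x hx) hxm)

-- ===== VERDICT (by name: the statement is the Claim_ definition above) =====
theorem categorize_complex_spec : Claim_equal_categorize_complex := by
  intro l _
  unfold Spec_categorize_complex
  cases l with
  | nil => rfl
  | cons a t =>
    simp only [categorize_complex, categorize_complex_alt, pvCnt_eq, pvFlags_eq,
      List.isEmpty_cons, Bool.false_eq_true, if_false, cond1 a t, cond2 (a :: t), cond3 a t]
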